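-- pv_equiv track=rewrite | github.com/larwinj/SmartCliff-Training | Strings&DataStructures/Program-20.py | find
-- ===== SOURCE A (Python) =====
-- def find(emails):
--     unique = set()
--
--     for email in emails:
--         local, domain = email.split("@")
--         # Ignore after '+'
--         if '+' in local:
--             local = local[:local.index('+')]
--         # Remove all '.'
--         local = local.replace(".", "")
--         unique.add(local + "@" + domain)
--
--     return len(unique)
-- ===== SOURCE B (Python) =====
-- def find(emails):
--     keys = []
--     for email in emails:
--         local, domain = email.split("@")
--         # Ignore after '+'
--         i = local.find('+')
--         if i >= 0:
--             local = local[:i]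
--         # Remove all '.'
--         local = local.replace(".", "")
--         keys.append(local + "@" + domain)
--     keys.sort()
--     count = 0
--     prev = None
--     for k in keys:
--         if k != prev:
--             count += 1
--             prev = k
--     return count
-- ===== Notes on version B (the rewrite author's own statement) =====
-- stated objective: alternative
-- what changed: Instead of accumulating normalized keys in a hash set and returning its size, B collects the normalized keys in a plain list, sorts it, and counts distinct values in one scan that increments whenever an element differs from its predecessor.
import Mathlib
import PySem

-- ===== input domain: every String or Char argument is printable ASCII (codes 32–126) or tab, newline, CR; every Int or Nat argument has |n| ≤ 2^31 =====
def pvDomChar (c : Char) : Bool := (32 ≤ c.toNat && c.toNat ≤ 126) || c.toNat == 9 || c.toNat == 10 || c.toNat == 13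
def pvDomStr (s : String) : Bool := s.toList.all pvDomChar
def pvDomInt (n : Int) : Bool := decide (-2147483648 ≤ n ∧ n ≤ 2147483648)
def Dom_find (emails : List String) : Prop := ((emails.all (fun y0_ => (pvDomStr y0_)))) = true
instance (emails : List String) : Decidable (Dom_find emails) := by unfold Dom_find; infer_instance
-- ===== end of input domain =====

-- B replaces A's hash-set accumulation by collect-all-keys, sort, and a single
-- scan counting predecessor changes; same normalization, same result (objective: alternative).


-- ===== PORT A =====
-- normalization of one email, A's code: unpack email.split("@"), truncate the
-- local part at the first '+' (guarded by '+' in local, so .index = Chars.find),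
-- remove '.', rebuild local + "@" + domain.  The fallback branch is unreachable
-- under Pre_find (Python raises ValueError on the unpacking there).
def normA (email : String) : String :=
  match PySem.Chars.splitOn email.toList ['@'] with
  | [l, d] =>
    let l := if PySem.Chars.isIn ['+'] l then
               PySem.Chars.slice l none (some (PySem.Chars.find l ['+'])) else l
    String.ofList (PySem.Chars.replace l ['.'] [] ++ '@' :: d)
  | _ => email

def find (emails : List String) : Int :=
  ((emails.foldl (fun (u : PySem.Set String) e => PySem.Set.add u (normA e))
      PySem.Set.empty).length : Int)

-- ===== PORT B =====
-- same normalization, written with find/slice as in Source B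
def normB (email : String) : String :=
  match PySem.Chars.splitOn email.toList ['@'] with
  | [l, d] =>
    let i := PySem.Chars.find l ['+']
    let l := if 0 ≤ i then PySem.Chars.slice l none (some i) else l
    String.ofList (PySem.Chars.replace l ['.'] [] ++ '@' :: d)
  | _ => email

def find_alt (emails : List String) : Int :=
  let keys := PySem.List.sorted (emails.map normB) (fun x => x) false
  (keys.foldl
    (fun (st : Int × Option String) k =>
      if st.2 = some k then st else (st.1 + 1, some k)) (0, none)).1

-- ===== PRECONDITION & SPEC =====
-- Pre_find: every email contains exactly one '@' (split("@") yields two pieces);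
-- on any other email Python's A raises ValueError at the tuple unpacking (B too).
def Pre_find (emails : List String) : Prop :=
  ∀ e ∈ emails, (PySem.Chars.splitOn e.toList ['@']).length = 2
instance (emails : List String) : Decidable (Pre_find emails) := by
  unfold Pre_find; infer_instance

def pvWitness_find : List String :=
  ["a.b+x@mail.com", "ab@mail.com", "a+y@mail.com", "c@d"]

def Spec_find (emails : List String) (out : Int) : Prop := out = find_alt emails
instance (emails : List String) (out : Int) : Decidable (Spec_find emails out) := by
  unfold Spec_find; infer_instance

-- ===== CLAIM (what is proved, stated in full; the proofs are below) =====
def Claim_equal_find : Prop :=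
  ∀ (emails : List String), Dom_find emails → Pre_find emails →
    Spec_find emails (find emails)

-- ===== LEMMAS AND PROOFS =====

-- the two normalizations agree on every string (both fall back to the input
-- when split("@") does not give two pieces)
theorem normA_eq_normB (email : String) : normA email = normB email := by
  unfold normA normB
  cases h : PySem.Chars.splitOn email.toList ['@'] with
  | nil => rfl
  | cons l t =>
    cases t with
    | nil => rfl
    | cons d t2 =>
      cases t2 with
      | cons _ _ => rfl
      | nil =>
        simp only
        congr 2
        by_cases hin : PySem.Chars.isIn ['+'] l = true
        · rw [if_pos hin, if_pos]
          rw [PySem.Chars.find_nonneg_iff, ← PySem.Chars.isIn_iff_infix]; exact hin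
        · rw [if_neg hin, if_neg]
          intro hge
          exact hin ((PySem.Chars.isIn_iff_infix _ _).mpr ((PySem.Chars.find_nonneg_iff _ _).mp hge))

-- A is the number of distinct normalized keys
theorem find_eq_card (emails : List String) :
    find emails = (((emails.map normA).toFinset.card : Nat) : Int) := by
  unfold find
  have h1 : emails.foldl (fun (u : PySem.Set String) e => PySem.Set.add u (normA e))
      PySem.Set.empty = PySem.Set.ofList (emails.map normA) := by
    rw [PySem.Set.ofList_eq_foldl, List.foldl_map]; rfl
  rw [h1]
  have h2 : (PySem.Set.ofList (emails.map normA)).toFinset = (emails.map normA).toFinset := by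
    ext x; simp [PySem.Set.mem_ofList]
  rw [← List.toFinset_card_of_nodup (PySem.Set.nodup_ofList (emails.map normA)), h2]

theorem card_insert_erase (k : String) (X : Finset String) :
    (insert k X).card = (X.erase k).card + 1 := by
  by_cases hk : k ∈ X
  · rw [Finset.insert_eq_self.mpr hk, ← Finset.card_erase_add_one hk]
  · rw [Finset.card_insert_of_notMem hk, Finset.erase_eq_of_notMem hk]

-- the scan over a ≤-sorted list counts its distinct values (elements below the
-- running "prev" bound erased, since prev blocks recounting only its own value)
theorem scan_foldl (s : List String) (hp : s.Pairwise (· ≤ ·)) :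
    ∀ (c : Int) (p : Option String), (∀ q, p = some q → ∀ x ∈ s, q ≤ x) →
    (s.foldl (fun (st : Int × Option String) k =>
        if st.2 = some k then st else (st.1 + 1, some k)) (c, p)).1
      = c + ((p.elim s.toFinset.card (fun q => (s.toFinset.erase q).card) : Nat) : Int) := by
  induction s with
  | nil => intro c p _; cases p <;> simp
  | cons k t ih =>
    intro c p hlb
    have hkt : ∀ x ∈ t, k ≤ x := fun x hx => (List.pairwise_cons.mp hp).1 x hx
    have ht : t.Pairwise (· ≤ ·) := (List.pairwise_cons.mp hp).2
    by_cases hpk : p = some k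
    · subst hpk
      simp only [List.foldl_cons, reduceIte]
      rw [ih ht c (some k) (fun q hq x hx => by cases hq; exact hkt x hx)]
      simp [Finset.erase_insert_eq_erase]
    · simp only [List.foldl_cons, if_neg hpk]
      rw [ih ht (c + 1) (some k) (fun q hq x hx => by cases hq; exact hkt x hx)]
      simp only [Option.elim_some]
      have hcard : ((k :: t).toFinset.erase k).card = (t.toFinset.erase k).card := by
        simp [Finset.erase_insert_eq_erase]
      cases p with
      | none =>
        simp only [Option.elim_none, List.toFinset_cons]
        rw [card_insert_erase]
        push_cast; ring
      | some q =>
        simp only [Option.elim_some]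
        have hqk : q < k := lt_of_le_of_ne (hlb q rfl k (by simp)) (fun h => hpk (by rw [h]))
        have hq_not : q ∉ (k :: t).toFinset := by
          simp only [List.toFinset_cons, Finset.mem_insert, List.mem_toFinset]
          rintro (rfl | hq)
          · exact absurd rfl (ne_of_lt hqk)
          · exact absurd (hkt q hq) (not_le.mpr hqk)
        rw [Finset.erase_eq_of_notMem hq_not]
        simp only [List.toFinset_cons]
        rw [card_insert_erase]
        push_cast; ring

theorem find_alt_eq_card (emails : List String) :
    find_alt emails = (((emails.map normB).toFinset.card : Nat) : Int) := by
  unfold find_alt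
  have hperm : (PySem.List.sorted (emails.map normB) (fun x => x) false).Perm (emails.map normB) :=
    PySem.List.sorted_perm _ _ _
  have hp : (PySem.List.sorted (emails.map normB) (fun x => x) false).Pairwise (· ≤ ·) := by
    simpa using PySem.List.sorted_pairwise (emails.map normB) (fun x => x)
  rw [scan_foldl _ hp 0 none (by intro q h; cases h)]
  rw [List.toFinset_eq_of_perm _ _ hperm]
  simp

-- ===== VERDICT (by name: the statement is the Claim_ definition above) =====
theorem find_spec : Claim_equal_find := by
  intro emails _ _
  unfold Spec_find
  rw [find_eq_card, find_alt_eq_card]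
  have : emails.map normA = emails.map normB := List.map_congr_left (fun e _ => normA_eq_normB e)
  rw [this]
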